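-- pv_equiv track=rewrite | github.com/Kaleaon/Pentary | hardware/tapeout/test/test_pentary.py | pentary_4digit_to_decimal
-- ===== SOURCE A (Python) =====
-- def pentary_digit_to_decimal(digit):
--     """Convert 3-bit pentary encoding to decimal value"""
--     decoding = {
--         0b000: -2,
--         0b001: -1,
--         0b010:  0,
--         0b011: +1,
--         0b100: +2
--     }
--     return decoding.get(digit & 0x7, 0)
--
-- def pentary_4digit_to_decimal(encoded):
--     """Convert 12-bit pentary encoding to decimal value"""
--     total = 0
--     multiplier = 1
--
--     for i in range(4):
--         digit = (encoded >> (i * 3)) & 0x7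
--         total += pentary_digit_to_decimal(digit) * multiplier
--         multiplier *= 5
--
--     return total
-- ===== SOURCE B (Python) =====
-- def pentary_digit_to_decimal(digit):
--     """Convert 3-bit pentary encoding to decimal value"""
--     decoding = {
--         0b000: -2,
--         0b001: -1,
--         0b010:  0,
--         0b011: +1,
--         0b100: +2
--     }
--     return decoding.get(digit & 0x7, 0)
--
-- def pentary_4digit_to_decimal(encoded):
--     """Convert 12-bit pentary encoding to decimal value (Horner, MSB first)"""
--     total = 0
--     for i in range(3, -1, -1):
--         total = total * 5 + pentary_digit_to_decimal((encoded >> (i * 3)) & 0x7)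
--     return total
-- ===== Notes on version B (the rewrite author's own statement) =====
-- stated objective: alternative
-- what changed: Replaces the LSB-first weighted sum with a separate multiplier accumulator by Horner's method iterating the digits MSB-first with a single running accumulator (total = total*5 + digit).
import Mathlib
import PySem

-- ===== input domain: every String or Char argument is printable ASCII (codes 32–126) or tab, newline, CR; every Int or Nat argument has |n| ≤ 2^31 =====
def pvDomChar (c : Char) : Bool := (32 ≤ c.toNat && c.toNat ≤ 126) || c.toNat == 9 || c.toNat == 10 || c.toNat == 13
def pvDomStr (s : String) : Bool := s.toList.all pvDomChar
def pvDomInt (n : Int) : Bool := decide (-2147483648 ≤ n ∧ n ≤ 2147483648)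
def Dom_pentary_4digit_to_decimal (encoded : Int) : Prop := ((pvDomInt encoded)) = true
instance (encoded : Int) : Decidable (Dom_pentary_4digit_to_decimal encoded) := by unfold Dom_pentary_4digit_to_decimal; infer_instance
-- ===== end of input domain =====

-- B replaces A's LSB-first multiplier accumulation with Horner's method over the digits MSB-first (alternative decomposition, same cost).

-- ===== PORT A =====
-- helper: pentary_digit_to_decimal (dict lookup with default 0)
def pentary_digit_to_decimal (digit : Int) : Int :=
  let decoding : PySem.Dict Int Int :=
    PySem.Dict.ofList [(0, -2), (1, -1), (2, 0), (3, 1), (4, 2)]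
  decoding.getD (Int.land digit 0x7) 0

def pentary_4digit_to_decimal (encoded : Int) : Int :=
  let r := (PySem.List.pyRange 0 4 1).foldl
    (fun (s : Int × Int) (i : Int) =>
      let digit := Int.land (encoded >>> (i * 3).toNat) 0x7
      (s.1 + pentary_digit_to_decimal digit * s.2, s.2 * 5))
    (0, 1)
  r.1

-- ===== PORT B =====
def pentary_4digit_to_decimal_alt (encoded : Int) : Int :=
  (PySem.List.pyRange 3 (-1) (-1)).foldl
    (fun (total : Int) (i : Int) =>
      total * 5 + pentary_digit_to_decimal (Int.land (encoded >>> (i * 3).toNat) 0x7))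
    0

-- ===== PRECONDITION & SPEC =====
def Spec_pentary_4digit_to_decimal (encoded : Int) (out : Int) : Prop := out = pentary_4digit_to_decimal_alt encoded
instance (encoded : Int) (out : Int) : Decidable (Spec_pentary_4digit_to_decimal encoded out) := by unfold Spec_pentary_4digit_to_decimal; infer_instance

-- ===== CLAIM (what is proved, stated in full; the proofs are below) =====
def Claim_equal_pentary_4digit_to_decimal : Prop := ∀ (encoded : Int), Dom_pentary_4digit_to_decimal encoded → Spec_pentary_4digit_to_decimal encoded (pentary_4digit_to_decimal encoded)

-- ===== LEMMAS AND PROOFS =====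
theorem pyRange_A : PySem.List.pyRange (0:Int) 4 1 = [0, 1, 2, 3] := by decide

theorem pyRange_B : PySem.List.pyRange (3:Int) (-1) (-1) = [3, 2, 1, 0] := by decide

-- ===== VERDICT (by name: the statement is the Claim_ definition above) =====
theorem pentary_4digit_to_decimal_spec : Claim_equal_pentary_4digit_to_decimal := by
  intro encoded _
  unfold Spec_pentary_4digit_to_decimal pentary_4digit_to_decimal pentary_4digit_to_decimal_alt
  rw [pyRange_A, pyRange_B]
  simp only [List.foldl]
  ring
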